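-- pv_equiv track=rewrite | github.com/QuentinLaborde-ENS/SNCF_Analysis | sanity_check/gaze_sanity_check/main.py | interval_merging
-- ===== SOURCE A (Python) =====
-- from itertools import groupby
-- from operator import itemgetter
--
-- def interval_merging(w_i):
--
--     intervals = list()
--     lengths = list()
--
--     for k, g in groupby(enumerate(w_i), lambda ix : ix[0] - ix[1]):
--         i_l = list(map(itemgetter(1), g))
--
--         ends_local = [i_l[0], i_l[-1]]
--         length = i_l[-1] - i_l[0] + 1
--         intervals.append(ends_local)
--         lengths.append(length)
--
--     if len(intervals)>0:
--         intervals.pop()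
--         lengths.pop()
--
--     return intervals, lengths
-- ===== SOURCE B (Python) =====
-- def interval_merging(w_i):
--     # One pass with explicit run state; the final (open) run is never emitted,
--     # which replaces A's append-then-pop of the last interval.
--     intervals = []
--     lengths = []
--     have = False
--     start = prev = 0
--     for x in w_i:
--         if not have:
--             have = True
--             start = x
--         elif x - prev != 1:
--             intervals.append([start, prev])
--             lengths.append(prev - start + 1)
--             start = x
--         prev = x
--     return intervals, lengths
-- ===== Notes on version B (the rewrite author's own statement) =====
-- stated objective: simpler
-- what changed: Replaced itertools.groupby over enumerate(w_i) with index-offset keys (plus materialising each group and popping the last interval) by a single pass that tracks explicit run state (start, prev) and simply never emits the final open run; avoiding the groupby/enumerate machinery and per-group list materialisation gives a constant-factor speedup.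
import Mathlib
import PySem

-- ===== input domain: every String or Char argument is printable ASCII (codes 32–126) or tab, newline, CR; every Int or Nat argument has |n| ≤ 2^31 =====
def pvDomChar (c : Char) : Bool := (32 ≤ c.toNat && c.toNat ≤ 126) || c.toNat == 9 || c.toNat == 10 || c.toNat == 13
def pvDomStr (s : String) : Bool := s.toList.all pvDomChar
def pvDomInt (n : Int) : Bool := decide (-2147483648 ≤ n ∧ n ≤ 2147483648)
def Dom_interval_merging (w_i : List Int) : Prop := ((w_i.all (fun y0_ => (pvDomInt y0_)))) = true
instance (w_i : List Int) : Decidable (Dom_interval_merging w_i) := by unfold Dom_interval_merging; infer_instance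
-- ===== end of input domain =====

-- B replaces A's groupby(enumerate)-then-pop with a single pass that keeps explicit
-- run state (start, prev) and never emits the final open run (objective: simpler).

-- ===== PORT A =====
-- groupby(enumerate(w_i), lambda ix: ix[0] - ix[1]) : consume maximal runs of equal key
def pvGroupBy (key : Int × Int → Int) : List (Int × Int) → List (List (Int × Int))
  | [] => []
  | h :: t =>
    let s := t.span (fun x => key x == key h)
    (h :: s.1) :: pvGroupBy key s.2
termination_by l => l.length
decreasing_by
  simp only [List.span_eq_takeWhile_dropWhile]
  exact Nat.lt_succ_of_le (List.length_dropWhile_le _ _)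

def interval_merging (w_i : List Int) : List (List Int) × List Int :=
  let st := (pvGroupBy (fun ix => ix.1 - ix.2) (PySem.List.enumerate w_i 0)).foldl
    (fun (acc : List (List Int) × List Int) g =>
      let i_l := g.map (·.2)
      let ends_local := [(i_l.head?).getD 0, (i_l.getLast?).getD 0]  -- i_l[0], i_l[-1]: always in range (groups nonempty)
      let length := (i_l.getLast?).getD 0 - (i_l.head?).getD 0 + 1
      (acc.1 ++ [ends_local], acc.2 ++ [length])) ([], [])
  if st.1.length > 0 then (st.1.dropLast, st.2.dropLast) else st

-- ===== PORT B =====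
-- state: ((intervals, lengths), have, start, prev)
def interval_merging_alt (w_i : List Int) : List (List Int) × List Int :=
  let st := w_i.foldl
    (fun (st : (List (List Int) × List Int) × Bool × Int × Int) x =>
      if !st.2.1 then (st.1, true, x, x)
      else if x - st.2.2.2 ≠ 1 then
        ((st.1.1 ++ [[st.2.2.1, st.2.2.2]], st.1.2 ++ [st.2.2.2 - st.2.2.1 + 1]), true, x, x)
      else (st.1, true, st.2.2.1, x))
    (([], []), false, 0, 0)
  st.1

-- ===== PRECONDITION & SPEC =====
def Spec_interval_merging (w_i : List Int) (out : List (List Int) × List Int) : Prop := out = interval_merging_alt w_i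
instance (w_i : List Int) (out : List (List Int) × List Int) : Decidable (Spec_interval_merging w_i out) := by unfold Spec_interval_merging; infer_instance

-- ===== CLAIM (what is proved, stated in full; the proofs are below) =====
def Claim_equal_interval_merging : Prop := ∀ (w_i : List Int), Dom_interval_merging w_i → Spec_interval_merging w_i (interval_merging w_i)

-- ===== LEMMAS AND PROOFS =====

/-- Maximal chain continuation: values, each exactly `prev`+1 more than the last. -/
def takeChain (prev : Int) : List Int → List Int
  | [] => []
  | y :: ys => if y - prev = 1 then y :: takeChain y ys else []

def dropChain (prev : Int) : List Int → List Int
  | [] => []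
  | y :: ys => if y - prev = 1 then dropChain y ys else y :: ys

def lastChain (prev : Int) : List Int → Int
  | [] => prev
  | y :: ys => if y - prev = 1 then lastChain y ys else prev

/-- All runs of the input (as (interval, length) pairs), including the final one. -/
def allRuns (start prev : Int) : List Int → List (List Int × Int)
  | [] => [([start, prev], prev - start + 1)]
  | y :: ys =>
    if y - prev = 1 then allRuns start y ys
    else ([start, prev], prev - start + 1) :: allRuns y y ys

def restRuns : List Int → List (List Int × Int)
  | [] => []
  | y :: ys => allRuns y y ys

theorem allRuns_ne_nil (start prev : Int) (xs : List Int) : allRuns start prev xs ≠ [] := by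
  induction xs generalizing start prev with
  | nil => simp [allRuns]
  | cons y ys ih => simp only [allRuns]; split_ifs <;> simp [ih]

theorem allRuns_eq (xs : List Int) (start prev : Int) :
    allRuns start prev xs =
      ([start, lastChain prev xs], lastChain prev xs - start + 1) :: restRuns (dropChain prev xs) := by
  induction xs generalizing prev with
  | nil => simp [allRuns, lastChain, dropChain, restRuns]
  | cons y ys ih =>
    simp only [allRuns, lastChain, dropChain]
    split_ifs with h
    · exact ih y
    · simp [restRuns]

theorem lastChain_spec (xs : List Int) (prev : Int) :
    ((prev :: takeChain prev xs).getLast?).getD 0 = lastChain prev xs := by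
  induction xs generalizing prev with
  | nil => simp [takeChain, lastChain]
  | cons y ys ih =>
    simp only [takeChain, lastChain]
    split_ifs with h
    · rw [List.getLast?_cons_cons]; exact ih y
    · simp

theorem span_enum (xs : List Int) (m prev : Int) :
    (PySem.List.enumerate xs m).span (fun iv => iv.1 - iv.2 == m - 1 - prev) =
      (PySem.List.enumerate (takeChain prev xs) m,
       PySem.List.enumerate (dropChain prev xs) (m + (takeChain prev xs).length)) := by
  induction xs generalizing m prev with
  | nil => simp [PySem.List.enumerate_nil, takeChain, dropChain, List.span_eq_takeWhile_dropWhile]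
  | cons y ys ih =>
    rw [PySem.List.enumerate_cons]
    simp only [List.span_eq_takeWhile_dropWhile, List.takeWhile_cons, List.dropWhile_cons]
    by_cases h : y - prev = 1
    · have hk : (m - y == m - 1 - prev) = true := by simp; omega
      simp only [hk]
      have := ih (m + 1) y
      rw [List.span_eq_takeWhile_dropWhile] at this
      have h1 := congrArg Prod.fst this
      have h2 := congrArg Prod.snd this
      simp only at h1 h2
      have hc : (m + 1 : Int) - 1 - y = m - 1 - prev := by omega
      rw [hc] at h1 h2
      simp only [takeChain, dropChain, if_pos h, PySem.List.enumerate_cons, h1, h2,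
        List.length_cons, if_true]
      refine Prod.ext rfl ?_
      simp only
      congr 1
      push_cast
      ring
    · have hk : (m - y == m - 1 - prev) = false := by simp; omega
      simp only [hk]
      simp [takeChain, dropChain, if_neg h, PySem.List.enumerate_cons]

theorem dropChain_length_le (xs : List Int) (prev : Int) :
    (dropChain prev xs).length ≤ xs.length := by
  induction xs generalizing prev with
  | nil => simp [dropChain]
  | cons y ys ih =>
    simp only [dropChain]
    split_ifs with h
    · exact le_trans (ih y) (Nat.le_succ _)
    · simp

/-- per-group computation of A -/
def toRun (g : List (Int × Int)) : List Int × Int :=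
  let i_l := g.map (·.2)
  ([(i_l.head?).getD 0, (i_l.getLast?).getD 0],
   (i_l.getLast?).getD 0 - (i_l.head?).getD 0 + 1)

theorem groups_eq_allRuns (n : Nat) :
    ∀ (xs : List Int), xs.length ≤ n → ∀ (k x : Int),
      (pvGroupBy (fun ix => ix.1 - ix.2) ((k, x) :: PySem.List.enumerate xs (k + 1))).map toRun
        = allRuns x x xs := by
  induction n with
  | zero =>
    intro xs hlen k x
    have hx : xs = [] := List.length_eq_zero_iff.mp (Nat.le_zero.mp hlen)
    subst hx
    simp [pvGroupBy, PySem.List.enumerate_nil, List.span_eq_takeWhile_dropWhile,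
      toRun, allRuns]
  | succ n ih =>
    intro xs hlen k x
    rw [pvGroupBy]
    simp only [List.span_eq_takeWhile_dropWhile]
    have hc : ((k, x).1 - (k, x).2 : Int) = (k + 1) - 1 - x := by simp
    rw [hc]
    have hs := span_enum xs (k + 1) x
    rw [List.span_eq_takeWhile_dropWhile] at hs
    have h1 := congrArg Prod.fst hs
    have h2 := congrArg Prod.snd hs
    simp only at h1 h2
    rw [h1, h2]
    have hmap : (((k, x) :: PySem.List.enumerate (takeChain x xs) (k + 1)).map (·.2))
        = x :: takeChain x xs := by
      simp [PySem.List.map_snd_enumerate]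
    have htr : toRun ((k, x) :: PySem.List.enumerate (takeChain x xs) (k + 1))
        = ([x, lastChain x xs], lastChain x xs - x + 1) := by
      simp only [toRun, hmap]
      rw [lastChain_spec]
      simp
    cases hdrop : dropChain x xs with
    | nil =>
      rw [allRuns_eq, hdrop]
      simp [pvGroupBy, htr, restRuns, PySem.List.enumerate_nil]
    | cons y ys =>
      rw [PySem.List.enumerate_cons, List.map_cons, htr]
      have hlen2 : ys.length ≤ n := by
        have := dropChain_length_le xs x
        rw [hdrop] at this
        simp at this
        omega
      rw [ih ys hlen2 (k + 1 + (takeChain x xs).length) y]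
      conv_rhs => rw [allRuns_eq xs x x, hdrop]
      simp [restRuns]

theorem A_foldl (groups : List (List (Int × Int))) :
    ∀ (I : List (List Int)) (L : List Int),
      groups.foldl
        (fun (acc : List (List Int) × List Int) g =>
          let i_l := g.map (·.2)
          let ends_local := [(i_l.head?).getD 0, (i_l.getLast?).getD 0]
          let length := (i_l.getLast?).getD 0 - (i_l.head?).getD 0 + 1
          (acc.1 ++ [ends_local], acc.2 ++ [length])) (I, L)
        = (I ++ (groups.map toRun).map Prod.fst, L ++ (groups.map toRun).map Prod.snd) := by
  induction groups with
  | nil => simp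
  | cons g gs ih =>
    intro I L
    simp only [List.foldl_cons, List.map_cons, ih]
    simp [toRun, List.append_assoc]

theorem B_loop (xs : List Int) :
    ∀ (start prev : Int) (I : List (List Int)) (L : List Int),
      (xs.foldl
        (fun (st : (List (List Int) × List Int) × Bool × Int × Int) x =>
          if !st.2.1 then (st.1, true, x, x)
          else if x - st.2.2.2 ≠ 1 then
            ((st.1.1 ++ [[st.2.2.1, st.2.2.2]], st.1.2 ++ [st.2.2.2 - st.2.2.1 + 1]), true, x, x)
          else (st.1, true, st.2.2.1, x))
        ((I, L), true, start, prev)).1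
      = (I ++ ((allRuns start prev xs).dropLast).map Prod.fst,
         L ++ ((allRuns start prev xs).dropLast).map Prod.snd) := by
  induction xs with
  | nil => simp [allRuns]
  | cons y ys ih =>
    intro start prev I L
    simp only [List.foldl_cons]
    by_cases h : y - prev = 1
    · simp only [allRuns, if_pos h]
      rw [show (if (!true) = true then ((I, L), true, y, y)
              else if y - prev ≠ 1 then
                ((I ++ [[start, prev]], L ++ [prev - start + 1]), true, y, y)
              else ((I, L), true, start, y)) =
             ((I, L), true, start, y) from by simp [h]]
      exact ih start y I L
    · simp only [allRuns, if_neg h]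
      have hne := allRuns_ne_nil y y ys
      rw [List.dropLast_cons_of_ne_nil hne]
      simp only [List.map_cons]
      rw [show (if (!true) = true then ((I, L), true, y, y)
              else if y - prev ≠ 1 then
                ((I ++ [[start, prev]], L ++ [prev - start + 1]), true, y, y)
              else ((I, L), true, start, y)) =
             ((I ++ [[start, prev]], L ++ [prev - start + 1]), true, y, y) from by simp [h]]
      rw [ih y y]
      simp [List.append_assoc]

-- ===== VERDICT (by name: the statement is the Claim_ definition above) =====
theorem interval_merging_spec : Claim_equal_interval_merging := by
  intro w_i _
  unfold Spec_interval_merging interval_merging interval_merging_alt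
  cases w_i with
  | nil =>
    simp [pvGroupBy, PySem.List.enumerate_nil]
  | cons x xs =>
    rw [PySem.List.enumerate_cons, List.foldl_cons]
    rw [show (if (!false) = true then (((([] : List (List Int)), ([] : List Int)), true, x, x))
          else if x - (0:Int) ≠ 1 then
            (((([] : List (List Int)) ++ [[(0:Int), 0]], ([] : List Int) ++ [(0:Int) - 0 + 1]), true, x, x))
          else ((([] : List (List Int)), ([] : List Int)), true, (0:Int), x)) =
        ((([] : List (List Int)), ([] : List Int)), true, x, x) from by simp]
    rw [B_loop xs x x [] []]
    have hg := groups_eq_allRuns xs.length xs (le_refl _) 0 x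
    rw [A_foldl]
    rw [hg]
    have hne := allRuns_ne_nil x x xs
    have hlen : (List.map Prod.fst (allRuns x x xs)).length > 0 := by
      simp [List.length_pos_iff]; exact hne
    simp only [List.nil_append]
    rw [if_pos hlen, ← List.map_dropLast, ← List.map_dropLast]
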